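-- pv_equiv track=rewrite | github.com/boyleconnor/Kalima | ArabicTools/utils.py | gen_result_pattern
-- ===== SOURCE A (Python) =====
-- import string
--
-- def check_special_letters(special_letters):
--     if any([len(special_key) > 1 for special_key in special_letters]):
--         raise ValueError('Specials must be one character long')
--     bad_specials = set(special_letters) & set(string.digits)
--     if bad_specials:
--         raise ValueError('Specials cannot be digits: %s' % bad_specials)
--
-- def gen_result_pattern(result_form, specials):
--     '''Replace all of the instances of each special key in the result string
--     with "{n}" where "n" is the number of the corresponding group in the origin
--     string.
--     '''
--     # FIXME: this is naive and insecure
--     result_pattern = ''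
--     special_letters = specials.keys()
--     check_special_letters(special_letters)
--     for letter in result_form:
--         if letter in special_letters:
--             result_pattern += '{%s}' % letter
--         else:
--             result_pattern += letter
--     return result_pattern
-- ===== SOURCE B (Python) =====
-- import string
--
-- def check_special_letters(special_letters):
--     if any([len(special_key) > 1 for special_key in special_letters]):
--         raise ValueError('Specials must be one character long')
--     bad_specials = set(special_letters) & set(string.digits)
--     if bad_specials:
--         raise ValueError('Specials cannot be digits: %s' % bad_specials)
--
-- def gen_result_pattern(result_form, specials):
--     '''Replace all of the instances of each special key in the result string
--     with "{n}" placeholders, via a prebuilt translation table.'''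
--     check_special_letters(specials.keys())
--     table = {ord(k): '{%s}' % k for k in specials.keys() if k}
--     return result_form.translate(table)
-- ===== Notes on version B (the rewrite author's own statement) =====
-- stated objective: idiomatic
-- what changed: Replaces the per-character accumulator loop with inner key-membership tests by building a translation table once (dict of ord(key) -> '{key}') and a single str.translate pass.
import Mathlib
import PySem

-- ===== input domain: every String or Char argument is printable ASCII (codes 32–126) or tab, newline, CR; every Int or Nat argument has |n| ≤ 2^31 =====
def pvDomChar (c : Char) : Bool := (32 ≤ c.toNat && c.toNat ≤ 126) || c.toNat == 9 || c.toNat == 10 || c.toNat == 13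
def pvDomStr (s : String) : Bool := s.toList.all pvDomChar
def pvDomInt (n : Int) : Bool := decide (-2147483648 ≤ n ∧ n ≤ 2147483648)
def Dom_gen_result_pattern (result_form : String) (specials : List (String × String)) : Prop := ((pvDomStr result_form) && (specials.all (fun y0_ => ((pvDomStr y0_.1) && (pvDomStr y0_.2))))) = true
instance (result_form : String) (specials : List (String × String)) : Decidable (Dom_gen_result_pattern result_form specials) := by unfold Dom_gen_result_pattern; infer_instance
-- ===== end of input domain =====

-- B builds a translation table (Char -> replacement) once and maps the string through it in one
-- pass, instead of A's accumulator loop testing each character's membership in the key list.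


-- ===== PORT A =====
-- `for letter in result_form: if letter in special_letters: … else: …`, accumulating a string
-- (check_special_letters raises outside Pre_; inside Pre_ it is a no-op, so it is not modelled)
def gen_result_pattern (result_form : String) (specials : List (String × String)) : String :=
  result_form.toList.foldl
    (fun result_pattern letter =>
      if (specials.map Prod.fst).contains (String.ofList [letter]) then
        result_pattern ++ "{" ++ String.ofList [letter] ++ "}"
      else
        result_pattern ++ String.ofList [letter])
    ""

-- ===== PORT B =====
-- `table = {ord(k): '{%s}' % k for k in specials.keys() if k}` (keys are single chars inside Pre_)
def pvTable (specials : List (String × String)) : PySem.Dict Char (List Char) :=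
  (specials.map Prod.fst).foldl
    (fun t k =>
      match k.toList with
      | [c] => t.insert c ['{', c, '}']
      | _ => t)
    PySem.Dict.empty

-- `result_form.translate(table)`: each char mapped to its table entry, untranslated chars kept
def gen_result_pattern_alt (result_form : String) (specials : List (String × String)) : String :=
  String.ofList (result_form.toList.flatMap (fun c => (pvTable specials).getD c [c]))

-- ===== PRECONDITION & SPEC =====
-- Pre_ excludes exactly the inputs on which the Python A raises ValueError in
-- check_special_letters: a special key longer than one character, or a key that is a digit.
def Pre_gen_result_pattern (result_form : String) (specials : List (String × String)) : Prop :=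
  (specials.all (fun p => p.1.toList.length ≤ 1 && !(p.1.toList.any Char.isDigit))) = true
instance (result_form : String) (specials : List (String × String)) : Decidable (Pre_gen_result_pattern result_form specials) := by unfold Pre_gen_result_pattern; infer_instance
def pvWitness_gen_result_pattern : String × (List (String × String)) := ("a b", [("a", "x"), ("", "y")])
def Spec_gen_result_pattern (result_form : String) (specials : List (String × String)) (out : String) : Prop := out = gen_result_pattern_alt result_form specials
instance (result_form : String) (specials : List (String × String)) (out : String) : Decidable (Spec_gen_result_pattern result_form specials out) := by unfold Spec_gen_result_pattern; infer_instance

-- ===== CLAIM (what is proved, stated in full; the proofs are below) =====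
def Claim_equal_gen_result_pattern : Prop := ∀ (result_form : String) (specials : List (String × String)), Dom_gen_result_pattern result_form specials → Pre_gen_result_pattern result_form specials → Spec_gen_result_pattern result_form specials (gen_result_pattern result_form specials)

-- ===== LEMMAS AND PROOFS =====

-- replacement of a single character, shared characterisation of both ports
def pvRepl (specials : List (String × String)) (c : Char) : List Char :=
  if (specials.map Prod.fst).contains (String.ofList [c]) then ['{', c, '}'] else [c]

theorem key_eq_iff (k : String) (c : Char) : k = String.ofList [c] ↔ k.toList = [c] := by
  rw [← String.toList_inj]; simp

theorem contains_eq_any (keys : List String) (c : Char) :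
    keys.contains (String.ofList [c]) = keys.any (fun k => decide (k.toList = [c])) := by
  apply Bool.eq_iff_iff.mpr
  simp only [List.contains_iff_mem, List.any_eq_true, decide_eq_true_eq]
  constructor
  · intro h; exact ⟨_, h, (key_eq_iff _ c).mp rfl⟩
  · rintro ⟨k, hk, h⟩; exact ((key_eq_iff k c).mpr h) ▸ hk

theorem table_getD_aux (keys : List String) (t : PySem.Dict Char (List Char)) (c : Char) :
    (keys.foldl
      (fun t k =>
        match k.toList with
        | [c] => t.insert c ['{', c, '}']
        | _ => t)
      t).getD c [c]
    = if keys.any (fun k => decide (k.toList = [c])) then ['{', c, '}'] else t.getD c [c] := by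
  induction keys generalizing t with
  | nil => simp
  | cons k ks ih =>
    simp only [List.foldl_cons, List.any_cons, ih]
    by_cases hks : ks.any (fun k => decide (k.toList = [c])) = true
    · simp [hks]
    · simp only [hks, Bool.or_false, if_false]
      match hk : k.toList with
      | [] => simp [hk]
      | [c'] =>
        simp only [hk, PySem.Dict.getD_insert]
        by_cases hc : c = c' <;> simp [hc, eq_comm]
      | _ :: _ :: _ => simp [hk]

theorem table_getD (specials : List (String × String)) (c : Char) :
    (pvTable specials).getD c [c] = pvRepl specials c := by
  unfold pvTable pvRepl
  rw [contains_eq_any, table_getD_aux]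
  split <;> simp [PySem.Dict.empty, PySem.Dict.getD, PySem.Dict.get?]

theorem foldlA (specials : List (String × String)) (l : List Char) (acc : String) :
    (l.foldl
      (fun result_pattern letter =>
        if (specials.map Prod.fst).contains (String.ofList [letter]) then
          result_pattern ++ "{" ++ String.ofList [letter] ++ "}"
        else
          result_pattern ++ String.ofList [letter])
      acc).toList = acc.toList ++ l.flatMap (pvRepl specials) := by
  induction l generalizing acc with
  | nil => simp
  | cons c cs ih =>
    simp only [List.foldl_cons, List.flatMap_cons, pvRepl]
    split <;> simp [ih]

-- ===== VERDICT (by name: the statement is the Claim_ definition above) =====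
theorem gen_result_pattern_spec : Claim_equal_gen_result_pattern := by
  intro result_form specials _ _
  unfold Spec_gen_result_pattern gen_result_pattern gen_result_pattern_alt
  rw [← String.toList_inj, foldlA]
  simp only [String.toList_empty, List.nil_append, String.toList_ofList]
  induction result_form.toList with
  | nil => rfl
  | cons c cs ih => simp [ih, table_getD]
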